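-- pv_equiv track=rewrite | github.com/patpij2/Logia-Competition-All-Solutions | logia 18/1/kolit3.py | kolit
-- ===== SOURCE A (Python) =====
-- def kolit(napis):
--     napis = [i for i in napis]
--     suma = 0
--     wys = 1
--     if len(napis) > 1:
--         for i in range(len(napis)):
--             if suma >= len(napis):
--                 while len(napis) != suma:
--                     napis.append(0)
--                 wys = i
--                 break
--             suma += i
--
--     piramida = [[]]
--     for i in range(wys):
--
--         for j in range(len(napis)):
--             if napis[j] != 0:
--                 piramida[i].append(napis[j])
--                 napis[j] = 0
--             if len(piramida[i]) == i+1: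
--                 break
--         piramida.append([])
--
--     piramida = [i for i in piramida if len(i) != 0]
--
--     maksi = -float('inf')
--     for i in piramida:
--         maksi = max(maksi,len(i))
--
--
--     for i in range(len(piramida)):
--         while len(piramida[i]) != maksi:
--             piramida[i].append(0)
--
--     licznik = 0
--     for i in range(len(piramida[0])):
--         tmp = []
--         for j in range(len(piramida)):
--             tmp.append(piramida[j][i])
--
--         tmp = [i for i in tmp if i != 0]
--         if len(tmp) == tmp.count(tmp[0]):
--             licznik +=1
--
--     return licznik
-- ===== SOURCE B (Python) =====
-- def kolit(napis):
--     n = len(napis)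
--     # build the pyramid rows with one advancing slice index (no rescans of the whole list)
--     rows = []
--     pos, size = 0, 1
--     while pos < n:
--         rows.append(napis[pos:pos + size])
--         pos += size
--         size += 1
--     if not rows:
--         return 0
--     width = 0
--     for r in rows:
--         width = max(width, len(r))
--     count = 0
--     for c in range(width):
--         col = [r[c] for r in rows if c < len(r)]
--         if all(x == col[0] for x in col):
--             count += 1
--     return count
-- ===== Notes on version B (the rewrite author's own statement) =====
-- stated objective: faster
-- what changed: B fills the pyramid rows by slicing the string with one advancing index instead of A's per-row rescan of the whole 0-marked list, and counts columns directly from the ragged rows instead of padding them; A's height pre-search, padding and filtering passes disappear.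
-- intended difference: On strings of length 2-4 A's height-search loop never breaks, so A keeps only the first character of the string and always returns 1; D_ is the subset of those strings whose full pyramid has a column count other than 1, where B returns that intended full-pyramid count (0 or 2). — e.g. on kolit("ab"): A returns 1, B returns 0
import Mathlib
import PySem

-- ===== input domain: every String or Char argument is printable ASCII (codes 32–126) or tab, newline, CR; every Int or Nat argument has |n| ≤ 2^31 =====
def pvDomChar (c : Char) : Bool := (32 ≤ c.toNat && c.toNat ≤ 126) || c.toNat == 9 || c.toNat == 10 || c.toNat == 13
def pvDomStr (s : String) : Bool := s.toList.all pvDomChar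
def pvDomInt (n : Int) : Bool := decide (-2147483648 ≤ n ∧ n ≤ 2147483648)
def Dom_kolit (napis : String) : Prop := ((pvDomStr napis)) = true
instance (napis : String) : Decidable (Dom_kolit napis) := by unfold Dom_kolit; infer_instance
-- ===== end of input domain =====

-- B builds the pyramid rows with one advancing slice index instead of A's per-row rescan of the
-- whole 0-marked character list, and counts columns directly from the ragged rows (no padding pass).

-- ===== PORT A =====
-- Python's working list holds characters and 0-markers; modelled as `Option Char` (`none` = 0).

-- the height-search loop: for i in range(n): if suma >= n: break (returning i and suma) else suma += i
def kolitWysLoop (n suma : Nat) : List Nat → Option (Nat × Nat)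
  | [] => none
  | i :: is => if n ≤ suma then some (i, suma) else kolitWysLoop n (suma + i) is

-- one row fill: scan the whole list left to right, moving characters into the row, break when full
def kolitRowScan (target : Nat) : List (Option Char) → List Char → List (Option Char) × List Char
  | [], row => ([], row)
  | x :: xs, row =>
    let row' := match x with
      | some c => row ++ [c]       -- piramida[i].append(napis[j]); napis[j] = 0
      | none => row
    if row'.length = target then (none :: xs, row')   -- len(piramida[i]) == i+1: break
    else
      let r := kolitRowScan target xs row'
      (none :: r.1, r.2)

-- the column-counting loop over range(len(piramida[0]))
def kolitColCount (padded : List (List (Option Char))) (len0 : Nat) : Int :=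
  (List.range len0).foldl (fun licznik i =>
    let tmp := padded.filterMap (fun r => r.getD i none)    -- column i with the zeros filtered out
    -- tmp[0]: within Pre_ tmp is never empty, headD's sentinel is unreachable there
    if tmp.length = tmp.count (tmp.headD ' ') then licznik + 1 else licznik) 0

def kolit (napis : String) : Int :=
  let cs := napis.toList
  let n := cs.length
  let lw : List (Option Char) × Nat :=
    if 1 < n then
      match kolitWysLoop n 0 (List.range n) with
      | some is => (cs.map some ++ List.replicate (is.2 - n) none, is.1)  -- while len(napis) != suma: append 0
      | none => (cs.map some, 1)
    else (cs.map some, 1)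
  -- for i in range(wys): fill row i (the always-empty extra row A appends is removed by the filter)
  let fill := (List.range lw.2).foldl
    (fun (acc : List (Option Char) × List (List Char)) i =>
      let r := kolitRowScan (i + 1) acc.1 []
      (r.1, acc.2 ++ [r.2])) (lw.1, [])
  let piramida := fill.2.filter (fun r => !r.isEmpty)
  -- Python's maksi starts at -inf; within Pre_ piramida is nonempty, so foldl from 0 is that maximum
  let maksi := piramida.foldl (fun m r => max m r.length) 0
  let padded := piramida.map (fun r => r.map some ++ List.replicate (maksi - r.length) (none : Option Char))
  kolitColCount padded (padded.headD []).length

-- ===== PORT B =====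

-- the while loop: rows.append(napis[pos:pos+size]); pos += size; size += 1   (here size = k+1, and
-- the remaining characters are the explicit list; fuel = their count bounds the iteration number)
def kolitChunks : Nat → List Char → Nat → List (List Char)
  | _, [], _ => []
  | 0, _ :: _, _ => []        -- never reached: fuel starts at the string length and dominates
  | f + 1, c :: cs, k => (c :: cs).take (k + 1) :: kolitChunks f ((c :: cs).drop (k + 1)) (k + 1)

def kolit_alt (napis : String) : Int :=
  let rows := kolitChunks napis.toList.length napis.toList 0
  if rows = [] then 0
  else
    let width := rows.foldl (fun m r => max m r.length) 0
    (List.range width).foldl (fun count c =>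
      let col := rows.filterMap (fun r => r[c]?)
      -- col[0]: col is never empty here, headD's sentinel is unreachable
      if col.all (fun x => x == col.headD ' ') then count + 1 else count) 0

-- ===== PRECONDITION & SPEC =====
-- Pre_ excludes only the empty string, on which A raises IndexError (piramida[0] of an empty pyramid).
def Pre_kolit (napis : String) : Prop := napis.toList ≠ []
instance (napis : String) : Decidable (Pre_kolit napis) := by unfold Pre_kolit; infer_instance

def pvWitness_kolit : String := "abcde"

-- On strings of length 2-4 A's height-search loop never breaks, so A keeps only the first character
-- of the string and always returns 1; D_ is the subset of those strings whose full pyramid has a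
-- column count other than 1, where B returns that intended full-pyramid count (0 or 2).
def D_kolit (napis : String) : Prop :=
  (napis.toList.length = 2 ∧ napis.toList.getD 0 ' ' ≠ napis.toList.getD 1 ' ') ∨
  (napis.toList.length = 3 ∧ napis.toList.getD 0 ' ' = napis.toList.getD 1 ' ') ∨
  (napis.toList.length = 4 ∧ napis.toList.getD 0 ' ' = napis.toList.getD 1 ' '
     ∧ napis.toList.getD 1 ' ' = napis.toList.getD 3 ' ')
instance (napis : String) : Decidable (D_kolit napis) := by unfold D_kolit; infer_instance

def Spec_kolit (napis : String) (out : Int) : Prop := ¬ D_kolit napis → out = kolit_alt napis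
instance (napis : String) (out : Int) : Decidable (Spec_kolit napis out) := by unfold Spec_kolit; infer_instance

def pvDiffWitness_kolit : String := "ab"
def pvDiffWitnessOut_kolit : Int × Int := (1, 0)

-- ===== CLAIM (what is proved, stated in full; the proofs are below) =====
def Claim_unchanged_kolit : Prop := ∀ (napis : String), Dom_kolit napis → Pre_kolit napis → Spec_kolit napis (kolit napis)
def Claim_changed_kolit : Prop := Dom_kolit (pvDiffWitness_kolit) ∧ Pre_kolit (pvDiffWitness_kolit) ∧ D_kolit (pvDiffWitness_kolit) ∧ kolit (pvDiffWitness_kolit) = pvDiffWitnessOut_kolit.1 ∧ kolit_alt (pvDiffWitness_kolit) = pvDiffWitnessOut_kolit.2 ∧ pvDiffWitnessOut_kolit.1 ≠ pvDiffWitnessOut_kolit.2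
def Claim_exact_kolit : Prop := ∀ (napis : String), Dom_kolit napis → Pre_kolit napis → D_kolit napis → kolit napis ≠ kolit_alt napis

-- ===== LEMMAS AND PROOFS =====

-- A's row loop written as take/drop chunks of the not-yet-consumed characters (proof-only helper)
def chunksFrom (cs : List Char) (i : Nat) : Nat → List (List Char)
  | 0 => []
  | b + 1 => cs.take (i + 1) :: chunksFrom (cs.drop (i + 1)) (i + 1) b

lemma rowScan_nones (k : Nat) (rest : List (Option Char)) (row : List Char) (t : Nat)
    (h : row.length ≠ t) :
    kolitRowScan t (List.replicate k none ++ rest) row =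
      (List.replicate k none ++ (kolitRowScan t rest row).1, (kolitRowScan t rest row).2) := by
  induction k with
  | zero => simp
  | succ k ih => simp [List.replicate_succ, kolitRowScan, h, ih]

lemma rowScan_somes (cs : List Char) (t : Nat) (row : List Char) (p : Nat)
    (h : row.length < t) :
    kolitRowScan t (cs.map some ++ List.replicate p none) row =
      if t ≤ row.length + cs.length then
        (List.replicate (t - row.length) none ++ (cs.drop (t - row.length)).map some
           ++ List.replicate p none,
         row ++ cs.take (t - row.length))
      else
        (List.replicate (cs.length + p) none, row ++ cs) := by
  induction cs generalizing row with
  | nil =>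
    have h' := rowScan_nones p [] row t (Nat.ne_of_lt h)
    simp only [List.append_nil] at h'
    simp only [List.map_nil, List.nil_append, List.length_nil]
    rw [if_neg (by omega), h']
    simp [kolitRowScan]
  | cons c cs ih =>
    simp only [List.map_cons, List.cons_append, kolitRowScan, List.length_append,
      List.length_cons, List.length_nil]
    by_cases hb : row.length + 1 = t
    · rw [if_pos (by simp [hb])]
      have hd : t - row.length = 1 := by omega
      rw [if_pos (by omega), hd]
      simp
    · have hlt : row.length + 1 < t := by omega
      rw [if_neg (by simpa using hb), ih (row ++ [c]) (by simpa using hlt)]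
      by_cases hc : t ≤ row.length + (cs.length + 1)
      · rw [if_pos (by simp; omega)]
        rw [if_pos (by omega)]
        have hd : t - row.length = (t - (row ++ [c]).length) + 1 := by simp; omega
        rw [hd]
        simp [List.replicate_succ, List.append_assoc]
      · rw [if_neg (by simp; omega)]
        rw [if_neg (by omega)]
        rw [show cs.length + 1 + p = (cs.length + p) + 1 from by omega, List.replicate_succ]
        simp

lemma rows_loop_eq (b : Nat) : ∀ (a k p : Nat) (cs : List Char) (acc : List (List Char)),
    ((List.range' a b).foldl
      (fun (st : List (Option Char) × List (List Char)) i =>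
        let r := kolitRowScan (i + 1) st.1 []
        (r.1, st.2 ++ [r.2]))
      (List.replicate k none ++ cs.map some ++ List.replicate p none, acc)).2
    = acc ++ chunksFrom cs a b := by
  induction b with
  | zero => intro a k p cs acc; simp [chunksFrom]
  | succ b ih =>
    intro a k p cs acc
    rw [List.range'_succ, List.foldl_cons]
    have h0 : ([] : List Char).length ≠ a + 1 := by simp
    simp only []
    rw [List.append_assoc, rowScan_nones k _ [] (a + 1) h0,
      rowScan_somes cs (a + 1) [] p (by simp)]
    by_cases hc : a + 1 ≤ cs.length
    · rw [if_pos (by simpa using hc)]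
      simp only [List.length_nil, Nat.sub_zero, List.nil_append]
      have : List.replicate k (none : Option Char) ++
          (List.replicate (a + 1) none ++ (cs.drop (a + 1)).map some ++ List.replicate p none)
          = List.replicate (k + (a + 1)) none ++ (cs.drop (a + 1)).map some
              ++ List.replicate p none := by
        simp only [← List.append_assoc, ← List.replicate_add]
      rw [this, ih (a + 1) (k + (a + 1)) p (cs.drop (a + 1)) (acc ++ [cs.take (a + 1)])]
      simp [chunksFrom]
    · rw [if_neg (by simpa using hc)]
      simp only [List.nil_append]
      have : List.replicate k (none : Option Char) ++ List.replicate (cs.length + p) none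
          = List.replicate (k + (cs.length + p)) none ++ ([] : List Char).map some
              ++ List.replicate 0 none := by
        simp only [List.map_nil, List.append_nil, List.replicate_zero]
        conv_rhs => rw [List.replicate_add]
      rw [this, ih (a + 1) (k + (cs.length + p)) 0 [] (acc ++ [cs])]
      have hdrop : cs.drop (a + 1) = [] := List.drop_eq_nil_of_le (by omega)
      have htake : cs.take (a + 1) = cs := List.take_of_length_le (by omega)
      simp [chunksFrom, hdrop, htake]

lemma chunksFrom_nil_filter (b : Nat) : ∀ (i : Nat),
    (chunksFrom [] i b).filter (fun r => !r.isEmpty) = [] := by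
  induction b with
  | zero => intro i; simp [chunksFrom]
  | succ b ih => intro i; simp [chunksFrom, ih]

lemma kolitChunks_nil (fuel i : Nat) : kolitChunks fuel [] i = [] := by
  cases fuel <;> rfl

lemma filter_chunksFrom (b : Nat) : ∀ (i fuel : Nat) (cs : List Char), cs.length ≤ fuel →
    2 * cs.length + i * (i + 1) ≤ (i + b) * (i + b + 1) →
    (chunksFrom cs i b).filter (fun r => !r.isEmpty) = kolitChunks fuel cs i := by
  induction b with
  | zero =>
    intro i fuel cs _ hcap
    have hnil : cs = [] := by
      have : 2 * cs.length + i * (i + 1) ≤ (i + 0) * (i + 0 + 1) := hcap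
      simp at this
      omega
    subst hnil
    simp [chunksFrom, kolitChunks_nil]
  | succ b ih =>
    intro i fuel cs hfuel hcap
    cases cs with
    | nil => rw [kolitChunks_nil]; exact chunksFrom_nil_filter (b + 1) i
    | cons c cs' =>
      cases fuel with
      | zero => simp at hfuel
      | succ f =>
        simp only [chunksFrom, kolitChunks, List.filter_cons]
        rw [if_pos (by simp [List.take_succ_cons])]
        congr 1
        apply ih (i + 1) f ((c :: cs').drop (i + 1))
          (by simp only [List.length_drop, List.length_cons] at hfuel ⊢; omega)
        have e1 : (i + 1) * (i + 1 + 1) = i * (i + 1) + 2 * (i + 1) := by ring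
        have e2 : (i + 1 + b) * (i + 1 + b + 1) = (i + (b + 1)) * (i + (b + 1) + 1) := by ring
        have e3 : ((c :: cs').drop (i + 1)).length = cs'.length - i := by simp
        have hmono : (i + 1) * (i + 1 + 1) ≤ (i + (b + 1)) * (i + (b + 1) + 1) :=
          Nat.mul_le_mul (by omega) (by omega)
        rw [e2, e3]
        simp only [List.length_cons] at hcap
        generalize i * (i + 1) = A at hcap e1
        generalize (i + 1) * (i + 1 + 1) = B at e1 hmono ⊢
        generalize (i + (b + 1)) * (i + (b + 1) + 1) = C at hcap hmono ⊢
        omega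

lemma wysLoop_some_spec (n : Nat) : ∀ (b a suma w s : Nat), 2 * suma ≤ a * (a + 1) →
    kolitWysLoop n suma (List.range' a b) = some (w, s) → n ≤ s ∧ 2 * s ≤ w * (w + 1) := by
  intro b
  induction b with
  | zero => intro a suma w s _ h; simp [kolitWysLoop] at h
  | succ b ih =>
    intro a suma w s hinv h
    rw [List.range'_succ] at h
    by_cases hn : n ≤ suma
    · simp [kolitWysLoop, hn] at h
      obtain ⟨rfl, rfl⟩ := h
      exact ⟨hn, hinv⟩
    · simp [kolitWysLoop, hn] at h
      exact ih (a + 1) (suma + a) w s (by nlinarith) h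

lemma wysLoop_none_final (n : Nat) : ∀ (b a suma : Nat), 0 < b →
    kolitWysLoop n suma (List.range' a b) = none → suma + (List.range' a (b - 1)).sum < n := by
  intro b
  induction b with
  | zero => intro a suma h; omega
  | succ b ih =>
    intro a suma _ h
    rw [List.range'_succ] at h
    by_cases hn : n ≤ suma
    · simp [kolitWysLoop, hn] at h
    · simp only [kolitWysLoop, if_neg hn] at h
      cases b with
      | zero => simpa using hn
      | succ b' =>
        have hthis := ih (a + 1) (suma + a) (by omega) h
        simp only [Nat.add_sub_cancel] at hthis ⊢
        rw [List.range'_succ, List.sum_cons]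
        omega

lemma range'_sum (m : Nat) : ∀ (a : Nat), 2 * (List.range' a m).sum + m = m * (2 * a + m) := by
  induction m with
  | zero => intro a; simp
  | succ m ih =>
    intro a
    rw [List.range'_succ, List.sum_cons]
    have := ih (a + 1)
    nlinarith

lemma wysLoop_some_of_five (n : Nat) (h5 : 5 ≤ n) :
    ∃ w s, kolitWysLoop n 0 (List.range n) = some (w, s) := by
  rcases h : kolitWysLoop n 0 (List.range n) with _ | ⟨w, s⟩
  · exfalso
    rw [List.range_eq_range'] at h
    have hfin := wysLoop_none_final n n 0 0 (by omega) h
    have hsum := range'_sum (n - 1) 0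
    obtain ⟨m, rfl⟩ : ∃ m, n = m + 5 := ⟨n - 5, by omega⟩
    simp only [Nat.zero_add] at hfin hsum
    have e : m + 5 - 1 = m + 4 := by omega
    rw [e] at hfin hsum
    nlinarith
  · exact ⟨w, s, rfl⟩

lemma pad_getD (r : List Char) (p i : Nat) :
    (r.map some ++ List.replicate p none).getD i none = r[i]? := by
  rw [List.getD_eq_getElem?_getD]
  by_cases h : i < r.length
  · rw [List.getElem?_append_left (by simpa using h)]
    simp [List.getElem?_map, List.getElem?_eq_getElem h]
  · rw [List.getElem?_append_right (by simpa using Nat.le_of_not_lt h)]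
    rw [List.getElem?_eq_none (show r.length ≤ i from Nat.le_of_not_lt h)]
    simp only [List.getElem?_replicate]
    split <;> rfl

lemma foldl_max_mono (rows : List (List Char)) : ∀ (m : Nat),
    m ≤ rows.foldl (fun m r => max m r.length) m := by
  induction rows with
  | nil => intro m; simp
  | cons r rs ih =>
    intro m
    calc m ≤ max m r.length := Nat.le_max_left _ _
    _ ≤ rs.foldl (fun m r => max m r.length) (max m r.length) := ih _

lemma foldl_max_le (rows : List (List Char)) : ∀ (m : Nat) (r : List Char), r ∈ rows →
    r.length ≤ rows.foldl (fun m r => max m r.length) m := by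
  induction rows with
  | nil => intro m r h; simp at h
  | cons q rs ih =>
    intro m r h
    rcases List.mem_cons.mp h with rfl | h
    · calc r.length ≤ max m r.length := Nat.le_max_right _ _
      _ ≤ _ := foldl_max_mono rs _
    · exact ih _ r h

lemma count_head_iff (tmp : List Char) :
    (tmp.length = tmp.count (tmp.headD ' ')) ↔ (tmp.all (fun x => x == tmp.headD ' ') = true) := by
  generalize tmp.headD ' ' = h0
  rw [List.all_eq_true]
  constructor
  · intro h x hx
    have := (List.count_eq_length.mp h.symm) x hx
    simp [this]
  · intro h
    refine (List.count_eq_length.mpr ?_).symm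
    intro x hx
    have := h x hx
    simp at this
    exact this.symm

lemma colcount_eq (rows : List (List Char)) :
    kolitColCount
      (rows.map (fun r => r.map some
        ++ List.replicate ((rows.foldl (fun m r => max m r.length) 0) - r.length) (none : Option Char)))
      ((rows.map (fun r => r.map some
        ++ List.replicate ((rows.foldl (fun m r => max m r.length) 0) - r.length) (none : Option Char))).headD []).length
    = (if rows = [] then 0 else
        (List.range (rows.foldl (fun m r => max m r.length) 0)).foldl (fun count c =>
          let col := rows.filterMap (fun r => r[c]?)
          if col.all (fun x => x == col.headD ' ') then count + 1 else count) 0) := by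
  cases rows with
  | nil => simp [kolitColCount]
  | cons r0 rs =>
    rw [if_neg (by simp)]
    have hlen : (((r0 :: rs).map (fun r => r.map some
        ++ List.replicate (((r0 :: rs).foldl (fun m r => max m r.length) 0) - r.length)
            (none : Option Char))).headD []).length
        = (r0 :: rs).foldl (fun m r => max m r.length) 0 := by
      have h0 : r0.length ≤ (r0 :: rs).foldl (fun m r => max m r.length) 0 :=
        foldl_max_le _ 0 r0 (by simp)
      simp only [List.map_cons, List.headD_cons, List.length_append, List.length_map,
        List.length_replicate]
      omega
    rw [hlen]
    unfold kolitColCount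
    apply PySem.List.foldl_congr_mem
    intro acc i _
    have hcol : ((r0 :: rs).map (fun r => r.map some
        ++ List.replicate (((r0 :: rs).foldl (fun m r => max m r.length) 0) - r.length)
            (none : Option Char))).filterMap (fun r => r.getD i none)
        = (r0 :: rs).filterMap (fun r => r[i]?) := by
      rw [List.filterMap_map]
      apply List.filterMap_congr
      intro r _
      exact pad_getD r _ i
    simp only [hcol]
    rw [if_congr (count_head_iff _) rfl rfl]

lemma rows_filter_eq (s : String) (w p : Nat)
    (hcap : 2 * s.toList.length ≤ w * (w + 1)) :
    (((List.range w).foldl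
        (fun (st : List (Option Char) × List (List Char)) i =>
          let r := kolitRowScan (i + 1) st.1 []
          (r.1, st.2 ++ [r.2]))
        (s.toList.map some ++ List.replicate p none, [])).2.filter (fun r => !r.isEmpty))
      = kolitChunks s.toList.length s.toList 0 := by
  have h1 : s.toList.map some ++ List.replicate p none
      = List.replicate 0 none ++ s.toList.map some ++ List.replicate p none := by simp
  rw [h1, List.range_eq_range', rows_loop_eq w 0 0 p s.toList []]
  simp only [List.nil_append]
  exact filter_chunksFrom w 0 s.toList.length s.toList le_rfl (by simpa using hcap)

lemma kolit_pipeline (s : String) (_hne : s.toList ≠ [])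
    (h : s.toList.length = 1 ∨ 5 ≤ s.toList.length) :
    kolit s = kolit_alt s := by
  obtain ⟨w, p, hlw, hcapw⟩ :
      ∃ w p, (if 1 < s.toList.length then
          match kolitWysLoop s.toList.length 0 (List.range s.toList.length) with
          | some is => (s.toList.map some ++ List.replicate (is.2 - s.toList.length) none, is.1)
          | none => (s.toList.map some, 1)
        else (s.toList.map some, 1))
        = (s.toList.map some ++ List.replicate p none, w)
        ∧ 2 * s.toList.length ≤ w * (w + 1) := by
    rcases h with h1 | h5
    · exact ⟨1, 0, by rw [if_neg (by omega)]; simp, by omega⟩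
    · obtain ⟨w, s', hw⟩ := wysLoop_some_of_five _ h5
      have hspec := wysLoop_some_spec s.toList.length s.toList.length 0 0 w s' (by simp)
        (by rwa [← List.range_eq_range'])
      exact ⟨w, s' - s.toList.length, by rw [if_pos (by omega), hw], by omega⟩
  unfold kolit kolit_alt
  simp only [hlw]
  rw [rows_filter_eq s w p hcapw]
  exact colcount_eq (kolitChunks s.toList.length s.toList 0)

lemma kolit_small (s : String) (h1 : 1 < s.toList.length) (h4 : s.toList.length ≤ 4) :
    kolit s = 1 := by
  obtain ⟨c, cs', hcs⟩ := List.exists_cons_of_ne_nil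
    (show s.toList ≠ [] by intro hh; rw [hh] at h1; simp at h1)
  have hnone : kolitWysLoop s.toList.length 0 (List.range s.toList.length) = none := by
    have h2 : s.toList.length = 2 ∨ s.toList.length = 3 ∨ s.toList.length = 4 := by omega
    rcases h2 with h2 | h2 | h2 <;> rw [h2] <;> decide
  unfold kolit
  simp only [hnone, if_pos h1]
  have hsh : s.toList.map some = List.replicate 0 none ++ s.toList.map some
      ++ List.replicate 0 none := by simp
  rw [hsh, List.range_eq_range', rows_loop_eq 1 0 0 0 s.toList []]
  rw [hcs]
  simp only [chunksFrom, List.take_succ_cons, List.take_zero, List.nil_append]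
  simp [kolitColCount]

lemma alt2 (s : String) (a b : Char) (h : s.toList = [a, b]) :
    kolit_alt s = if a = b then 1 else 0 := by
  unfold kolit_alt
  rw [h]
  by_cases hab : a = b
  · subst hab; simp [kolitChunks, List.range_succ]
  · simp [kolitChunks, List.range_succ, hab, Ne.symm hab]

lemma alt3 (s : String) (a b c : Char) (h : s.toList = [a, b, c]) :
    kolit_alt s = if a = b then 2 else 1 := by
  unfold kolit_alt
  rw [h]
  by_cases hab : a = b
  · subst hab; simp [kolitChunks, List.range_succ]
  · simp [kolitChunks, List.range_succ, hab, Ne.symm hab]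

lemma alt4 (s : String) (a b c d : Char) (h : s.toList = [a, b, c, d]) :
    kolit_alt s = if a = b ∧ b = d then 2 else 1 := by
  unfold kolit_alt
  rw [h]
  by_cases hab : a = b
  · subst hab
    by_cases had : a = d
    · subst had; simp [kolitChunks, List.range_succ]
    · simp [kolitChunks, List.range_succ, had, Ne.symm had]
  · by_cases had : a = d
    · subst had; simp [kolitChunks, List.range_succ, hab, Ne.symm hab]
    · simp [kolitChunks, List.range_succ, hab, Ne.symm hab, Ne.symm had]

lemma toList_eq_four (s : String) (h : s.toList.length = 4) :
    ∃ a b c d, s.toList = [a, b, c, d] := by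
  obtain ⟨a, t, hl⟩ := List.exists_cons_of_ne_nil
    (show s.toList ≠ [] by intro hh; rw [hh] at h; simp at h)
  have ht3 : t.length = 3 := by rw [hl] at h; simpa using h
  obtain ⟨b, c, d, ht⟩ := List.length_eq_three.mp ht3
  exact ⟨a, b, c, d, by rw [hl, ht]⟩

-- ===== VERDICT (by name: the statement is the Claim_ definition above) =====
theorem kolit_spec : Claim_unchanged_kolit := by
  intro s hdom hpre hnd
  by_cases hbig : s.toList.length = 1 ∨ 5 ≤ s.toList.length
  · exact kolit_pipeline s hpre hbig
  · have h0 : s.toList.length ≠ 0 := by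
      intro hh; exact hpre (List.length_eq_zero_iff.mp hh)
    have h1 : 1 < s.toList.length := by omega
    have h4 : s.toList.length ≤ 4 := by omega
    rw [kolit_small s h1 h4]
    have h2 : s.toList.length = 2 ∨ s.toList.length = 3 ∨ s.toList.length = 4 := by omega
    rcases h2 with h2 | h2 | h2
    · obtain ⟨a, b, hab⟩ := List.length_eq_two.mp h2
      have hD' : a = b := by
        by_contra hne2
        exact hnd (Or.inl ⟨h2, by rw [hab]; simpa using hne2⟩)
      rw [alt2 s a b hab, if_pos hD']
    · obtain ⟨a, b, c, habc⟩ := List.length_eq_three.mp h2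
      have hD' : a ≠ b := fun he =>
        hnd (Or.inr (Or.inl ⟨h2, by rw [habc]; simpa using he⟩))
      rw [alt3 s a b c habc, if_neg hD']
    · obtain ⟨a, b, c, d, habcd⟩ := toList_eq_four s h2
      have hD' : ¬(a = b ∧ b = d) := fun he =>
        hnd (Or.inr (Or.inr ⟨h2, by rw [habcd]; simpa using he.1,
          by rw [habcd]; simpa using he.2⟩))
      rw [alt4 s a b c d habcd, if_neg hD']

theorem kolit_changed : Claim_changed_kolit := by
  unfold Claim_changed_kolit; decide

theorem kolit_tight : Claim_exact_kolit := by
  intro s hdom hpre hD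
  rcases hD with ⟨h2, hne⟩ | ⟨h3, heq⟩ | ⟨h4, heq1, heq2⟩
  · obtain ⟨a, b, hab⟩ := List.length_eq_two.mp h2
    rw [kolit_small s (by omega) (by omega), alt2 s a b hab,
      if_neg (by rw [hab] at hne; simpa using hne)]
    decide
  · obtain ⟨a, b, c, habc⟩ := List.length_eq_three.mp h3
    rw [kolit_small s (by omega) (by omega), alt3 s a b c habc,
      if_pos (by rw [habc] at heq; simpa using heq)]
    decide
  · obtain ⟨a, b, c, d, habcd⟩ := toList_eq_four s h4
    rw [kolit_small s (by omega) (by omega), alt4 s a b c d habcd,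
      if_pos ⟨by rw [habcd] at heq1; simpa using heq1,
        by rw [habcd] at heq2; simpa using heq2⟩]
    decide
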